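-- pv_equiv track=rewrite | github.com/jbedichekTT/ttnn-op-generator | front_end/front_end_parser.py | parse_ir_markers
-- ===== SOURCE A (Python) =====
-- from typing import List, Tuple, Any
--
-- FE_MARKERS = [
--     "/TEMPLATE",
--     "/PROMPT",
--     "/RUN",
--     "/DEBUG_LOOP",
--     "/EXIT",
--     "/MULTI_STAGE"
-- ]
--
-- def parse_ir_markers(input_file_content: str) -> List[str]:
--     """
--     Parses a text string containing markers and extracts sections.
--     Each section starts with a marker and goes until the next marker or end of content.
--     Markers are included in the section.
--     """
--     if not any(marker in input_file_content for marker in FE_MARKERS):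
--         return []
--
--     marker_positions = []
--     for marker in FE_MARKERS:
--         pos = 0
--         while True:
--             pos = input_file_content.find(marker, pos)
--             if pos == -1:
--                 break
--             marker_positions.append((pos, marker))
--             pos += len(marker)
--
--     marker_positions.sort()
--
--     sections = []
--     for i in range(len(marker_positions)):
--         start_pos = marker_positions[i][0]
--         end_pos = marker_positions[i + 1][0] if i + 1 < len(marker_positions) else len(input_file_content)
--         section = input_file_content[start_pos:end_pos].strip()
--         if section:
--             sections.append(section)
--     return sections
-- ===== SOURCE B (Python) =====
-- # Single left-to-right scan for marker occurrences (no per-marker find passes, no sort),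
-- # then the same slice/strip/drop-empty section building.
-- from typing import List
--
-- FE_MARKERS = [
--     "/TEMPLATE",
--     "/PROMPT",
--     "/RUN",
--     "/DEBUG_LOOP",
--     "/EXIT",
--     "/MULTI_STAGE"
-- ]
--
-- def parse_ir_markers(input_file_content: str) -> List[str]:
--     n = len(input_file_content)
--     starts = []
--     i = 0
--     while i < n:
--         for marker in FE_MARKERS:
--             if input_file_content.startswith(marker, i):
--                 starts.append(i)
--                 i += len(marker)
--                 break
--         else:
--             i += 1
--     if not starts:
--         return []
--     sections = []
--     for start, end in zip(starts, starts[1:] + [n]):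
--         section = input_file_content[start:end].strip()
--         if section:
--             sections.append(section)
--     return sections
-- ===== Notes on version B (the rewrite author's own statement) =====
-- stated objective: alternative
-- what changed: Replaces A's six per-marker find() passes plus a global sort of (position, marker) tuples by a single left-to-right scan that collects marker start positions already in document order (no marker overlaps another, so one pass suffices), then builds sections from consecutive start pairs via zip instead of an index loop.
import Mathlib
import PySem

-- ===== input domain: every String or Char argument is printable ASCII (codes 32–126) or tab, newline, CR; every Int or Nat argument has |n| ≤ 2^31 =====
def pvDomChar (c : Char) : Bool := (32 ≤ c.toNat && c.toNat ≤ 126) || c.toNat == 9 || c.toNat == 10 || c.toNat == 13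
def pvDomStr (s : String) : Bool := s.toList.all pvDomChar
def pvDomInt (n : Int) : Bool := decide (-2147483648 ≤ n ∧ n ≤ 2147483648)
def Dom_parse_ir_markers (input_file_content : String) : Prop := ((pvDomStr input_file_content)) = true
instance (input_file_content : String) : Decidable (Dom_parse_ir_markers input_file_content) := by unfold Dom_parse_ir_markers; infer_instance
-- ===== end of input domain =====

-- B replaces A's six per-marker find() passes plus a sort of (position, marker) tuples by one
-- left-to-right scan collecting marker starts already in document order (objective: alternative).

-- ===== PORT A =====
-- FE_MARKERS (module constant), as lists of characters
def feMarkers : List (List Char) :=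
  ["/TEMPLATE".toList, "/PROMPT".toList, "/RUN".toList,
   "/DEBUG_LOOP".toList, "/EXIT".toList, "/MULTI_STAGE".toList]

-- the inner 'while True: pos = content.find(marker, pos); …' loop of A;
-- fuel = len(content) + 1 only makes the recursion structural (each found occurrence
-- moves pos forward by len(marker) ≥ 1), it never cuts the loop short.
def findAllA (c m : List Char) : Nat → Int → List (Int × List Char)
  | 0, _ => []
  | fuel+1, pos =>
    let p := PySem.Chars.findFrom c m pos none
    if p = -1 then []
    else (p, m) :: findAllA c m fuel (p + m.length)

-- A's final 'for i in range(len(marker_positions)): …' section loop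
def sectionsA (c : List Char) (mp : List (Int × List Char)) : List String :=
  (PySem.List.pyRange 0 (PySem.List.len mp) 1).foldl
    (fun acc i =>
      let start_pos := (PySem.List.pyGetD mp i (0, [])).1
      let end_pos := if i + 1 < PySem.List.len mp
        then (PySem.List.pyGetD mp (i + 1) (0, [])).1
        else (c.length : Int)
      let sec := PySem.Chars.strip (PySem.Chars.slice c (some start_pos) (some end_pos))
      if sec ≠ [] then acc ++ [String.ofList sec] else acc)
    []

def parse_ir_markers (input_file_content : String) : List String :=
  let c := input_file_content.toList
  if !(feMarkers.any (fun m => PySem.Chars.isIn m c)) then []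
  else
    let mp := feMarkers.foldl (fun acc m => acc ++ findAllA c m (c.length + 1) 0) []
    let mps := PySem.List.sorted2 mp (fun t => t.1) (fun t => t.2)
    sectionsA c mps

-- ===== PORT B =====
-- B's 'while i < n: for marker in FE_MARKERS: if content.startswith(marker, i): … break / else: i += 1'
-- fuel = len(content) only makes the recursion structural (i strictly increases each step).
def scanB (c : List Char) : Nat → Nat → List Int
  | 0, _ => []
  | fuel+1, i =>
    if i < c.length then
      match feMarkers.find? (fun m => PySem.Chars.startswith (List.drop i c) m) with
      | some m => (i : Int) :: scanB c fuel (i + m.length)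
      | none => scanB c fuel (i + 1)
    else []

def parse_ir_markers_alt (input_file_content : String) : List String :=
  let c := input_file_content.toList
  let starts := scanB c c.length 0
  if starts = [] then []
  else
    (starts.zip (PySem.List.slice starts (some 1) none ++ [(c.length : Int)])).foldl
      (fun acc se =>
        let sec := PySem.Chars.strip (PySem.Chars.slice c (some se.1) (some se.2))
        if sec ≠ [] then acc ++ [String.ofList sec] else acc)
      []

-- ===== PRECONDITION & SPEC =====
def Spec_parse_ir_markers (input_file_content : String) (out : List String) : Prop := out = parse_ir_markers_alt input_file_content
instance (input_file_content : String) (out : List String) : Decidable (Spec_parse_ir_markers input_file_content out) := by unfold Spec_parse_ir_markers; infer_instance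

-- ===== CLAIM (what is proved, stated in full; the proofs are below) =====
def Claim_equal_parse_ir_markers : Prop := ∀ (input_file_content : String), Dom_parse_ir_markers input_file_content → Spec_parse_ir_markers input_file_content (parse_ir_markers input_file_content)

-- ===== LEMMAS AND PROOFS =====

-- a marker matches at position q of c (reducible so the IsPrefix Decidable instance applies)
abbrev pvHit (c : List Char) (q : Nat) (m : List Char) : Prop := m <+: c.drop q

-- ground truth: occurrence positions of one marker from position k on (A's view)
def occs (c m : List Char) (k : Nat) : List Nat :=
  (List.range' k (c.length - k)).filter (fun q => decide (pvHit c q m))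

-- ground truth: all marker occurrences from position i on, in document order (B's view)
def canonFrom (c : List Char) (i : Nat) : List (Nat × List Char) :=
  (List.range' i (c.length - i)).filterMap
    (fun q => (feMarkers.find? (fun m => PySem.Chars.startswith (List.drop q c) m)).map (fun m => (q, m)))

-- marker shape facts
lemma markers_ne : ∀ m ∈ feMarkers, m ≠ [] := by decide

lemma markers_shape : ∀ m ∈ feMarkers, m.head? = some '/' ∧ '/' ∉ m.tail := by decide

lemma markers_no_prefix : ∀ m₁ ∈ feMarkers, ∀ m₂ ∈ feMarkers, m₁ <+: m₂ → m₁ = m₂ := by decide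

-- occurrences of two markers never overlap (every marker starts with '/' and has no later '/')
lemma no_overlap {c : List Char} {m₁ m₂ : List Char} {p q : Nat}
    (h₁ : m₁ ∈ feMarkers) (h₂ : m₂ ∈ feMarkers)
    (hp : pvHit c p m₁) (hq : pvHit c q m₂) (hlt : p < q) : p + m₁.length ≤ q := by
  by_contra hcon
  push Not at hcon
  obtain ⟨hh₁, ht₁⟩ := markers_shape m₁ h₁
  obtain ⟨hh₂, -⟩ := markers_shape m₂ h₂
  obtain ⟨t, ht⟩ := hq
  obtain ⟨s, hs⟩ := hp
  have hm₂ne : m₂ ≠ [] := markers_ne m₂ h₂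
  -- the char of c at q, read through the match at q: it is '/'
  have e₂ : (List.drop q c).head? = some '/' := by
    rw [← ht, List.head?_append]
    simp [hh₂]
  -- the same char read through the match at p: it is m₁[q-p] with 0 < q-p < |m₁|
  have hdd : List.drop q c = List.drop (q - p) (List.drop p c) := by
    rw [List.drop_drop]
    congr 1
    omega
  have e₁ : (List.drop q c).head? = m₁[q - p]? := by
    rw [hdd, ← hs, List.drop_append, List.head?_append, List.head?_drop]
    have : q - p < m₁.length := by omega
    simp [List.getElem?_eq_getElem this]
  -- so m₁ has '/' in its tail: contradiction
  obtain ⟨a, t₁, rfl⟩ : ∃ a t₁, m₁ = a :: t₁ := by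
    cases m₁ with
    | nil => simp at hh₁
    | cons a t₁ => exact ⟨a, t₁, rfl⟩
  obtain ⟨k, hk⟩ : ∃ k, q - p = k + 1 := ⟨q - p - 1, by omega⟩
  have : t₁[k]? = some '/' := by
    have := e₁.symm.trans e₂
    rwa [hk, List.getElem?_cons_succ] at this
  exact ht₁ (List.mem_of_getElem? this)

-- at most one marker matches at a given position
lemma hit_unique {c : List Char} {m₁ m₂ : List Char} {p : Nat}
    (h₁ : m₁ ∈ feMarkers) (h₂ : m₂ ∈ feMarkers)
    (hp : pvHit c p m₁) (hq : pvHit c p m₂) : m₁ = m₂ := by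
  rcases le_total m₁.length m₂.length with h | h
  · exact markers_no_prefix m₁ h₁ m₂ h₂ (List.prefix_of_prefix_length_le hp hq h)
  · exact (markers_no_prefix m₂ h₂ m₁ h₁ (List.prefix_of_prefix_length_le hq hp h)).symm

lemma find?_marker_eq_some_iff {c : List Char} {p : Nat} {m : List Char} :
    feMarkers.find? (fun m' => PySem.Chars.startswith (List.drop p c) m') = some m ↔
      m ∈ feMarkers ∧ pvHit c p m := by
  constructor
  · intro h
    exact ⟨List.mem_of_find?_eq_some h,
      (PySem.Chars.startswith_iff _ _).mp (List.find?_some h)⟩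
  · rintro ⟨hmem, hhit⟩
    have hsome : (feMarkers.find? (fun m' => PySem.Chars.startswith (List.drop p c) m')).isSome := by
      rw [List.find?_isSome]
      exact ⟨m, hmem, (PySem.Chars.startswith_iff _ _).mpr hhit⟩
    obtain ⟨m', hm'⟩ := Option.isSome_iff_exists.mp hsome
    have : m' = m :=
      hit_unique (List.mem_of_find?_eq_some hm') hmem
        ((PySem.Chars.startswith_iff _ _).mp (List.find?_some hm')) hhit
    rwa [this] at hm'

-- a match reaches at most the end of the string
lemma hit_le {c m : List Char} {q : Nat} (hm : m ∈ feMarkers) (h : pvHit c q m) :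
    q + m.length ≤ c.length := by
  have h1 := h.length_le
  have h2 : 0 < m.length := List.length_pos_iff.mpr (markers_ne m hm)
  simp only [List.length_drop] at h1
  omega

lemma infix_of_hit {c m : List Char} {q k : Nat} (hk : k ≤ q) (h : pvHit c q m) :
    m <:+: List.drop k c := by
  rw [← PySem.Chars.isIn_iff_infix, ← PySem.Chars.exists_prefix_drop_iff_isIn]
  refine ⟨q - k, ?_⟩
  rw [List.drop_drop]
  have : k + (q - k) = q := by omega
  rwa [this]

lemma hit_of_infix {c m : List Char} {k : Nat} (h : m <:+: List.drop k c) :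
    ∃ q, k ≤ q ∧ pvHit c q m := by
  rw [← PySem.Chars.isIn_iff_infix, ← PySem.Chars.exists_prefix_drop_iff_isIn] at h
  obtain ⟨j, hj⟩ := h
  rw [List.drop_drop] at hj
  exact ⟨k + j, by omega, hj⟩

-- no marker matches in the interval [a, a+n) ⟹ that chunk contributes nothing
lemma occs_chunk_nil {c m : List Char} {a n : Nat}
    (h : ∀ q, a ≤ q → q < a + n → ¬ pvHit c q m) :
    (List.range' a n).filter (fun q => decide (pvHit c q m)) = [] := by
  rw [List.filter_eq_nil_iff]
  intro q hq
  rw [List.mem_range'_1] at hq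
  simpa using h q hq.1 hq.2

lemma canon_chunk_nil {c : List Char} {a n : Nat}
    (h : ∀ q, a ≤ q → q < a + n → ∀ m ∈ feMarkers, ¬ pvHit c q m) :
    (List.range' a n).filterMap
      (fun q => (feMarkers.find? (fun m => PySem.Chars.startswith (List.drop q c) m)).map
        (fun m => (q, m))) = [] := by
  rw [List.filterMap_eq_nil_iff]
  intro q hq
  rw [List.mem_range'_1] at hq
  rw [Option.map_eq_none_iff, List.find?_eq_none]
  intro m hm hsw
  exact h q hq.1 hq.2 m hm ((PySem.Chars.startswith_iff _ _).mp hsw)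

-- A's find loop lists exactly the occurrences of m from k on
lemma findAllA_eq (c m : List Char) (hm : m ∈ feMarkers) :
    ∀ fuel k, k ≤ c.length → c.length + 1 - k ≤ fuel →
      findAllA c m fuel (k : Int) = (occs c m k).map (fun (q : Nat) => ((q : Int), m)) := by
  intro fuel
  induction fuel with
  | zero => intro k hk hf; omega
  | succ fuel ih =>
    intro k hk hf
    rw [findAllA]
    by_cases hp1 : PySem.Chars.findFrom c m (k : Int) none = -1
    · simp only [hp1, reduceIte]
      have hno : ¬ m <:+: List.drop k c := by
        have := (PySem.Chars.findFrom_natCast_eq_neg_one_iff c m k hk).mp hp1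
        exact this
      have : occs c m k = [] := by
        unfold occs
        apply occs_chunk_nil
        intro q hq _ hhit
        exact hno (infix_of_hit hq hhit)
      rw [this]
      rfl
    · obtain ⟨hkp, hpref, hmin⟩ := PySem.Chars.findFrom_natCast_spec c m k hk hp1
      rw [if_neg hp1]
      set p := PySem.Chars.findFrom c m (k : Int) none with hpdef
      set q := p.toNat with hqdef
      have hp0 : (0 : Int) ≤ p := le_trans (by exact_mod_cast Nat.zero_le k) hkp
      have hpq : p = (q : Int) := (Int.toNat_of_nonneg hp0).symm
      have hhit : pvHit c q m := hpref
      have hqa : q + m.length ≤ c.length := hit_le hm hhit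
      have hml : 0 < m.length := List.length_pos_iff.mpr (markers_ne m hm)
      have hqk : k ≤ q := by omega
      -- split the remaining positions at q and skip the body of the match
      have hocc : occs c m k = q :: occs c m (q + m.length) := by
        unfold occs
        have e1 : c.length - k = (q - k) + ((c.length - q - m.length) + m.length) := by omega
        rw [e1, ← List.range'_append (s := k) (m := q - k) (step := 1)]
        rw [List.filter_append]
        have e2 : k + 1 * (q - k) = q := by omega
        rw [e2]
        have h1 : (List.range' k (q - k)).filter (fun r => decide (pvHit c r m)) = [] := by
          apply occs_chunk_nil
          intro r hr1 hr2
          exact hmin r hr1 (by omega)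
        rw [h1]
        have e3 : (c.length - q - m.length) + m.length = ((m.length - 1) + (c.length - (q + m.length))) + 1 := by
          omega
        rw [e3, List.range'_succ, List.filter_cons]
        have : decide (pvHit c q m) = true := by simpa using hhit
        rw [this]
        have e4 : (m.length - 1) + (c.length - (q + m.length)) = (m.length - 1) + (c.length - (q + m.length)) := rfl
        rw [← List.range'_append (s := q + 1) (m := m.length - 1) (step := 1), List.filter_append]
        have h2 : (List.range' (q + 1) (m.length - 1)).filter (fun r => decide (pvHit c r m)) = [] := by
          apply occs_chunk_nil
          intro r hr1 hr2 hhr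
          have := no_overlap hm hm hhit hhr (by omega)
          omega
        rw [h2]
        have e5 : q + 1 + 1 * (m.length - 1) = q + m.length := by omega
        rw [e5]
        rfl
      rw [hocc, List.map_cons]
      have harg : p + (m.length : Int) = ((q + m.length : Nat) : Int) := by push_cast; omega
      rw [harg, ih (q + m.length) (by omega) (by omega)]
      rw [hpq]

-- B's scan lists the positions of all occurrences, in document order
lemma scanB_eq (c : List Char) :
    ∀ fuel i, i ≤ c.length → c.length - i ≤ fuel →
      scanB c fuel i = (canonFrom c i).map (fun pm => ((pm.1 : Int))) := by
  intro fuel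
  induction fuel with
  | zero =>
    intro i hi hf
    have : i = c.length := by omega
    subst this
    simp [scanB, canonFrom]
  | succ fuel ih =>
    intro i hi hf
    rw [scanB]
    by_cases hlt : i < c.length
    · rw [if_pos hlt]
      cases hfind : feMarkers.find? (fun m => PySem.Chars.startswith (List.drop i c) m) with
      | some m =>
        obtain ⟨hmem, hhit⟩ := find?_marker_eq_some_iff.mp hfind
        have hqa : i + m.length ≤ c.length := hit_le hmem hhit
        have hml : 0 < m.length := List.length_pos_iff.mpr (markers_ne m hmem)
        have hcanon : canonFrom c i = (i, m) :: canonFrom c (i + m.length) := by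
          unfold canonFrom
          have e1 : c.length - i = ((m.length - 1) + (c.length - (i + m.length))) + 1 := by omega
          rw [e1, List.range'_succ, List.filterMap_cons]
          rw [hfind]
          simp only [Option.map_some]
          congr 1
          rw [← List.range'_append (s := i + 1) (m := m.length - 1) (step := 1), List.filterMap_append]
          have h2 : (List.range' (i + 1) (m.length - 1)).filterMap
              (fun q => (feMarkers.find? (fun m' => PySem.Chars.startswith (List.drop q c) m')).map
                (fun m' => (q, m'))) = [] := by
            apply canon_chunk_nil
            intro r hr1 hr2 m₂ hm₂ hhr
            have := no_overlap hmem hm₂ hhit hhr (by omega)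
            omega
          rw [h2]
          have e5 : i + 1 + 1 * (m.length - 1) = i + m.length := by omega
          rw [e5]
          simp
        rw [hcanon]
        simp only [List.map_cons]
        rw [ih (i + m.length) (by omega) (by omega)]
      | none =>
        have hcanon : canonFrom c i = canonFrom c (i + 1) := by
          unfold canonFrom
          have e1 : c.length - i = (c.length - (i + 1)) + 1 := by omega
          rw [e1, List.range'_succ, List.filterMap_cons, hfind]
          simp
        rw [hcanon]
        exact ih (i + 1) (by omega) (by omega)
    · rw [if_neg hlt]
      have : i = c.length := by omega
      subst this
      simp [canonFrom]

-- all occurrences in document order, with Int positions (what B's starts list is built from)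
def canonI (c : List Char) : List (Int × List Char) :=
  (canonFrom c 0).map (fun pm => ((pm.1 : Int), pm.2))

-- the unsorted pool of occurrences A collects, marker by marker
def flatI (c : List Char) : List (Int × List Char) :=
  feMarkers.flatMap (fun m => (occs c m 0).map (fun (q : Nat) => ((q : Int), m)))

lemma mem_flatI {c : List Char} {x : Int × List Char} :
    x ∈ flatI c ↔ ∃ (q : Nat) (m : List Char), x = ((q : Int), m) ∧ m ∈ feMarkers ∧ pvHit c q m := by
  unfold flatI
  simp only [List.mem_flatMap, List.mem_map]
  constructor
  · rintro ⟨m, hm, q, hq, rfl⟩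
    unfold occs at hq
    rw [List.mem_filter] at hq
    exact ⟨q, m, rfl, hm, by simpa using hq.2⟩
  · rintro ⟨q, m, rfl, hm, hhit⟩
    refine ⟨m, hm, q, ?_, rfl⟩
    unfold occs
    rw [List.mem_filter, List.mem_range'_1]
    have h1 := hit_le hm hhit
    have h2 : 0 < m.length := List.length_pos_iff.mpr (markers_ne m hm)
    exact ⟨⟨by omega, by omega⟩, by simpa using hhit⟩

lemma mem_canonI {c : List Char} {x : Int × List Char} :
    x ∈ canonI c ↔ ∃ (q : Nat) (m : List Char), x = ((q : Int), m) ∧ m ∈ feMarkers ∧ pvHit c q m := by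
  unfold canonI canonFrom
  constructor
  · rintro hx
    obtain ⟨pm, hpm, rfl⟩ := List.mem_map.mp hx
    obtain ⟨q, hq, hf⟩ := List.mem_filterMap.mp hpm
    obtain ⟨m, hm_eq, hpm_eq⟩ := Option.map_eq_some_iff.mp hf
    obtain ⟨hmem, hhit⟩ := find?_marker_eq_some_iff.mp hm_eq
    exact ⟨q, m, by rw [← hpm_eq], hmem, hhit⟩
  · rintro ⟨q, m, rfl, hm, hhit⟩
    refine List.mem_map.mpr ⟨(q, m), List.mem_filterMap.mpr ⟨q, ?_, ?_⟩, rfl⟩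
    · rw [List.mem_range'_1]
      have h1 := hit_le hm hhit
      have h2 : 0 < m.length := List.length_pos_iff.mpr (markers_ne m hm)
      omega
    · rw [find?_marker_eq_some_iff.mpr ⟨hm, hhit⟩]
      rfl

-- within the occurrence pool, the position determines the pair
lemma flatI_fst_inj {c : List Char} :
    ∀ a ∈ flatI c, ∀ b ∈ flatI c, a.1 = b.1 → a = b := by
  intro a ha b hb hab
  obtain ⟨q, m, rfl, hm, hhit⟩ := mem_flatI.mp ha
  obtain ⟨q', m', rfl, hm', hhit'⟩ := mem_flatI.mp hb
  have hqq : q = q' := by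
    have : ((q : Int)) = ((q' : Int)) := hab
    exact_mod_cast this
  subst hqq
  rw [hit_unique hm hm' hhit hhit']

lemma nodup_flatMap_markers (c : List Char) :
    ∀ (L : List (List Char)), L.Nodup →
      (L.flatMap (fun m => (occs c m 0).map (fun (q : Nat) => ((q : Int), m)))).Nodup := by
  intro L
  induction L with
  | nil => simp
  | cons m L ih =>
    intro h
    obtain ⟨hm, hL⟩ := List.nodup_cons.mp h
    rw [List.flatMap_cons, List.nodup_append]
    refine ⟨?_, ih hL, ?_⟩
    · apply List.Nodup.map
      · intro a b hab
        simpa using hab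
      · exact ((List.pairwise_lt_range' 1).filter _).imp ne_of_lt
    · intro a ha b hb hab
      obtain ⟨q, -, rfl⟩ := List.mem_map.mp ha
      obtain ⟨m', hm', hb'⟩ := List.mem_flatMap.mp hb
      obtain ⟨q', -, rfl⟩ := List.mem_map.mp hb'
      have : m = m' := congrArg Prod.snd hab
      exact hm (this ▸ hm')

lemma nodup_flatI (c : List Char) : (flatI c).Nodup :=
  nodup_flatMap_markers c feMarkers (by decide)

lemma pairwise_fst_lt_canonI (c : List Char) :
    (canonI c).Pairwise (fun a b => a.1 < b.1) := by
  unfold canonI canonFrom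
  refine List.Pairwise.map _ (fun a b h => h) ?_
  refine List.Pairwise.filterMap _ ?_ (List.pairwise_lt_range' 1)
  intro a a' haa b hb b' hb'
  obtain ⟨m, -, hbm⟩ := Option.map_eq_some_iff.mp hb
  obtain ⟨m', -, hbm'⟩ := Option.map_eq_some_iff.mp hb'
  have hlt : ((a : Int)) < ((a' : Int)) := by exact_mod_cast haa
  rw [← hbm, ← hbm']
  exact hlt

lemma nodup_canonI (c : List Char) : (canonI c).Nodup :=
  (pairwise_fst_lt_canonI c).imp (fun h heq => by subst heq; exact lt_irrefl _ h)

lemma perm_canonI_flatI (c : List Char) : (canonI c).Perm (flatI c) :=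
  (List.perm_ext_iff_of_nodup (nodup_canonI c) (nodup_flatI c)).mpr
    (fun x => by rw [mem_canonI, mem_flatI])

-- insertion with two comparators that agree on the elements at hand is the same insertion
lemma insertBy_congr {α : Type} (before before' : α → α → Bool) (x : α) :
    ∀ ys : List α, (∀ y ∈ ys, before x y = before' x y) →
      PySem.List.insertBy before x ys = PySem.List.insertBy before' x ys := by
  intro ys
  induction ys with
  | nil => intro _; rfl
  | cons y ys ih =>
    intro h
    show (if before x y then x :: y :: ys else y :: PySem.List.insertBy before x ys) =
      (if before' x y then x :: y :: ys else y :: PySem.List.insertBy before' x ys)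
    rw [h y (List.mem_cons_self)]
    split_ifs with hb
    · rfl
    · rw [ih (fun z hz => h z (List.mem_cons_of_mem _ hz))]

lemma foldl_insertBy_congr {α : Type} (before before' : α → α → Bool) (S : List α)
    (H : ∀ a ∈ S, ∀ b ∈ S, before a b = before' a b) :
    ∀ (l acc : List α), (∀ a ∈ l, a ∈ S) → (∀ b ∈ acc, b ∈ S) →
      l.foldl (fun acc x => PySem.List.insertBy before x acc) acc =
      l.foldl (fun acc x => PySem.List.insertBy before' x acc) acc := by
  intro l
  induction l with
  | nil => intro acc _ _; rfl
  | cons x l ih =>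
    intro acc hl hacc
    simp only [List.foldl_cons]
    rw [insertBy_congr before before' x acc
      (fun y hy => H x (hl x List.mem_cons_self) y (hacc y hy))]
    apply ih
    · exact fun a ha => hl a (List.mem_cons_of_mem _ ha)
    · intro b hb
      rw [PySem.List.mem_insertBy] at hb
      rcases hb with rfl | hb
      · exact hl b List.mem_cons_self
      · exact hacc b hb

-- Python's tuple sort is the sort by position alone when all positions are distinct
lemma sorted2_eq_sorted_fst (xs : List (Int × List Char))
    (hinj : ∀ a ∈ xs, ∀ b ∈ xs, a.1 = b.1 → a = b) :
    PySem.List.sorted2 xs (fun t => t.1) (fun t => t.2) =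
      PySem.List.sorted xs (fun t => t.1) := by
  unfold PySem.List.sorted2 PySem.List.sorted
  simp only [Bool.false_eq_true, if_false]
  apply foldl_insertBy_congr _ _ xs ?_ xs [] (fun a ha => ha) (by simp)
  intro a ha b hb
  rcases lt_trichotomy a.1 b.1 with h | h | h
  · simp [h]
  · have hab : a = b := hinj a ha b hb h
    subst hab
    simp
  · simp [h, not_lt_of_gt h]

lemma sorted_flatI_eq (c : List Char) :
    PySem.List.sorted2 (flatI c) (fun t => t.1) (fun t => t.2) = canonI c := by
  rw [sorted2_eq_sorted_fst _ flatI_fst_inj]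
  exact PySem.List.sorted_eq_of_perm_of_pairwise_lt (flatI c) (canonI c) (fun t => t.1)
    (perm_canonI_flatI c) (pairwise_fst_lt_canonI c)

-- the list of heads, read with the same defaults A's index loop uses
lemma fst_getD (mp : List (Int × List Char)) (k : Nat) :
    (mp.getD k ((0 : Int), ([] : List Char))).1 = (mp.map (fun t => t.1)).getD k 0 := by
  by_cases h : k < mp.length
  · rw [List.getD_eq_getElem _ _ h, List.getD_eq_getElem _ _ (by simpa using h)]
    simp
  · rw [List.getD_eq_default _ _ (by omega), List.getD_eq_default _ _ (by simpa using (by omega : mp.length ≤ k))]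

lemma zip_starts_eq (starts : List Int) (n : Int) :
    starts.zip (starts.tail ++ [n]) =
      (List.range starts.length).map
        (fun k => (starts.getD k 0, if k + 1 < starts.length then starts.getD (k + 1) 0 else n)) := by
  apply List.ext_getElem
  · simp only [List.length_zip, List.length_append, List.length_tail, List.length_map,
      List.length_range, List.length_cons, List.length_nil]
    omega
  · intro i h1 h2
    have hi : i < starts.length := by simpa using h2
    rw [List.getElem_zip, List.getElem_map, List.getElem_range]
    refine Prod.ext ?_ ?_
    · exact (List.getD_eq_getElem _ _ hi).symm
    · show (starts.tail ++ [n])[i]'(by simp [List.length_tail]; omega) = _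
      by_cases hc : i + 1 < starts.length
      · rw [List.getElem_append_left (by simp only [List.length_tail]; omega)]
        rw [List.getElem_tail, if_pos hc, List.getD_eq_getElem _ _ hc]
      · rw [List.getElem_append_right (by simp only [List.length_tail]; omega)]
        simp [if_neg hc]

lemma map_filter_pointwise {α β γ : Type} (R : List γ) (g₁ : γ → α) (g₂ : γ → β)
    (p₁ : α → Bool) (p₂ : β → Bool) (f₁ : α → String) (f₂ : β → String)
    (hp : ∀ x ∈ R, p₁ (g₁ x) = p₂ (g₂ x)) (hf : ∀ x ∈ R, f₁ (g₁ x) = f₂ (g₂ x)) :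
    ((R.map g₁).filter p₁).map f₁ = ((R.map g₂).filter p₂).map f₂ := by
  rw [List.filter_map, List.filter_map, List.map_map, List.map_map]
  rw [List.filter_congr (p := p₁ ∘ g₁) (q := p₂ ∘ g₂) (fun x hx => hp x hx)]
  exact List.map_congr_left (fun x hx => hf x (List.mem_of_mem_filter hx))

-- A's index loop over marker_positions equals B's zip loop over the same start positions
lemma sectionsA_eq_zip (c : List Char) (mp : List (Int × List Char)) :
    sectionsA c mp =
      ((mp.map (fun t => t.1)).zip ((mp.map (fun t => t.1)).tail ++ [(c.length : Int)])).foldl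
        (fun acc se =>
          let sec := PySem.Chars.strip (PySem.Chars.slice c (some se.1) (some se.2))
          if sec ≠ [] then acc ++ [String.ofList sec] else acc) [] := by
  have hA : sectionsA c mp =
      [] ++ ((PySem.List.pyRange 0 (PySem.List.len mp) 1).filter
          (fun i => decide (PySem.Chars.strip (PySem.Chars.slice c
              (some ((PySem.List.pyGetD mp i ((0 : Int), ([] : List Char))).1))
              (some (if i + 1 < PySem.List.len mp
                then (PySem.List.pyGetD mp (i + 1) ((0 : Int), ([] : List Char))).1
                else ((c.length : Int))))) ≠ []))).map
        (fun i => String.ofList (PySem.Chars.strip (PySem.Chars.slice c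
              (some ((PySem.List.pyGetD mp i ((0 : Int), ([] : List Char))).1))
              (some (if i + 1 < PySem.List.len mp
                then (PySem.List.pyGetD mp (i + 1) ((0 : Int), ([] : List Char))).1
                else ((c.length : Int))))))) :=
    PySem.List.foldl_append_ite _ _ _ _
  have hB : ((mp.map (fun t => t.1)).zip ((mp.map (fun t => t.1)).tail ++ [(c.length : Int)])).foldl
        (fun acc se =>
          let sec := PySem.Chars.strip (PySem.Chars.slice c (some se.1) (some se.2))
          if sec ≠ [] then acc ++ [String.ofList sec] else acc) [] =
      [] ++ (((mp.map (fun t => t.1)).zip ((mp.map (fun t => t.1)).tail ++ [(c.length : Int)])).filter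
          (fun se => decide (PySem.Chars.strip (PySem.Chars.slice c (some se.1) (some se.2)) ≠ []))).map
        (fun se => String.ofList (PySem.Chars.strip (PySem.Chars.slice c (some se.1) (some se.2)))) :=
    PySem.List.foldl_append_ite _ _ _ _
  rw [hA, hB, List.nil_append, List.nil_append]
  rw [zip_starts_eq (mp.map (fun t => t.1)) ((c.length : Int))]
  rw [PySem.List.len_eq, PySem.List.pyRange_zero_nat]
  have hlen : (mp.map (fun t => t.1)).length = mp.length := by simp
  rw [hlen]
  -- pointwise: A's body at index ↑k is B's body at the k-th consecutive pair
  have hsec : ∀ k ∈ List.range mp.length,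
      PySem.Chars.strip (PySem.Chars.slice c
          (some ((PySem.List.pyGetD mp ((k : Nat) : Int) ((0 : Int), ([] : List Char))).1))
          (some (if ((k : Nat) : Int) + 1 < ((mp.length : Nat) : Int)
            then (PySem.List.pyGetD mp (((k : Nat) : Int) + 1) ((0 : Int), ([] : List Char))).1
            else ((c.length : Int))))) =
      PySem.Chars.strip (PySem.Chars.slice c
          (some ((mp.map (fun t => t.1)).getD k 0))
          (some (if k + 1 < mp.length
            then (mp.map (fun t => t.1)).getD (k + 1) 0
            else ((c.length : Int))))) := by
    intro k hk
    have e1 : ((k : Nat) : Int) + 1 = (((k + 1 : Nat)) : Int) := by push_cast; ring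
    have e2 : (((k : Nat) : Int) + 1 < ((mp.length : Nat) : Int)) ↔ (k + 1 < mp.length) := by
      rw [e1]
      exact_mod_cast Iff.rfl
    congr 1
    congr 1
    · rw [PySem.List.pyGetD_natCast, fst_getD]
    · rw [if_congr e2 ?_ rfl]
      rw [e1, PySem.List.pyGetD_natCast, fst_getD]
  apply map_filter_pointwise
  · intro k hk
    simp only [decide_eq_decide]
    rw [hsec k hk]
  · intro k hk
    rw [hsec k hk]

lemma guard_false_iff (c : List Char) :
    (feMarkers.any (fun m => PySem.Chars.isIn m c)) = false ↔ canonFrom c 0 = [] := by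
  constructor
  · intro h
    rw [List.any_eq_false] at h
    unfold canonFrom
    apply canon_chunk_nil
    intro q _ _ m hm hhit
    have hin : PySem.Chars.isIn m c = true := by
      rw [PySem.Chars.isIn_iff_infix]
      have := infix_of_hit (Nat.zero_le q) hhit
      rwa [List.drop_zero] at this
    exact (h m hm) hin
  · intro h
    rw [List.any_eq_false]
    intro m hm hin
    have hinf : m <:+: List.drop 0 c := by
      rw [List.drop_zero]
      exact (PySem.Chars.isIn_iff_infix _ _).mp hin
    obtain ⟨q, -, hhit⟩ := hit_of_infix hinf
    have hq : q < c.length := by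
      have h1 := hit_le hm hhit
      have h2 : 0 < m.length := List.length_pos_iff.mpr (markers_ne m hm)
      omega
    have hsome : (feMarkers.find? (fun m' => PySem.Chars.startswith (List.drop q c) m')).isSome := by
      rw [List.find?_isSome]
      exact ⟨m, hm, (PySem.Chars.startswith_iff _ _).mpr hhit⟩
    obtain ⟨m', hm'⟩ := Option.isSome_iff_exists.mp hsome
    have hmem : (q, m') ∈ canonFrom c 0 := by
      unfold canonFrom
      refine List.mem_filterMap.mpr ⟨q, ?_, by rw [hm']; rfl⟩
      rw [List.mem_range'_1]
      omega
    rw [h] at hmem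
    simp at hmem

-- ===== VERDICT (by name: the statement is the Claim_ definition above) =====
theorem parse_ir_markers_spec : Claim_equal_parse_ir_markers := by
  intro s _
  show parse_ir_markers s = parse_ir_markers_alt s
  simp only [parse_ir_markers, parse_ir_markers_alt]
  have hscan : scanB s.toList s.toList.length 0 =
      (canonFrom s.toList 0).map (fun pm => ((pm.1 : Int))) :=
    scanB_eq s.toList s.toList.length 0 (Nat.zero_le _) (by omega)
  by_cases hg : feMarkers.any (fun m => PySem.Chars.isIn m s.toList) = true
  · -- some marker occurs: both sides build the same sections
    simp only [hg, Bool.not_true, Bool.false_eq_true, if_false]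
    have hcm : canonFrom s.toList 0 ≠ [] := by
      intro h0
      rw [(guard_false_iff s.toList).mpr h0] at hg
      cases hg
    have hstarts_ne : ¬ scanB s.toList s.toList.length 0 = [] := by
      rw [hscan]
      simpa [List.map_eq_nil_iff] using hcm
    rw [if_neg hstarts_ne]
    have hmp : feMarkers.foldl (fun acc m => acc ++ findAllA s.toList m (s.toList.length + 1) 0) []
        = flatI s.toList := by
      rw [PySem.List.foldl_congr_mem feMarkers _
        (fun acc m => acc ++ (occs s.toList m 0).map (fun (q : Nat) => ((q : Int), m))) []
        (fun acc m hm => by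
          congr 1
          simpa using findAllA_eq s.toList m hm (s.toList.length + 1) 0 (Nat.zero_le _) (by omega))]
      rw [PySem.List.foldl_append_eq_flatMap]
      rfl
    rw [hmp, sorted_flatI_eq, sectionsA_eq_zip]
    have hSt : (canonI s.toList).map (fun t => t.1) =
        (canonFrom s.toList 0).map (fun pm => ((pm.1 : Int))) := by
      unfold canonI
      rw [List.map_map]
      rfl
    rw [hSt, ← hscan, PySem.List.slice_from_one]
  · -- no marker occurs: A returns [] at its guard, B's scan finds nothing
    have hg' : feMarkers.any (fun m => PySem.Chars.isIn m s.toList) = false :=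
      Bool.eq_false_iff.mpr hg
    simp only [hg', Bool.not_false, if_true]
    have h0 : canonFrom s.toList 0 = [] := (guard_false_iff s.toList).mp hg'
    have hsc : scanB s.toList s.toList.length 0 = [] := by
      rw [hscan, h0]
      rfl
    rw [hsc, if_pos rfl]
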